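-- pv_equiv track=rewrite | github.com/YuxuanTang2002/RegFGW | src/regfgw/structure_to_graph.py | group_layers_into_periods
-- ===== SOURCE A (Python) =====
-- from typing import Dict, Any, List, DefaultDict, Tuple
--
-- def group_layers_into_periods(layers: List[List[int]], period_layers: int):
--     """Group consecutive layers into blocks(periods)."""
--     if period_layers <= 0:
--         raise ValueError("period_layers must be > 0")
--
--     nl = len(layers)
--     periods: List[List[int]] = []
--     npd = nl // period_layers
--
--     for p in range(npd):
--         s = p * period_layers
--         e = s + period_layers
--         block_layers = layers[s:e]
--         atom_idx = sorted([int(a) for layer in block_layers for a in layer])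
--         periods.append(atom_idx)
--
--     return periods
-- ===== SOURCE B (Python) =====
-- def group_layers_into_periods(layers, period_layers):
--     """Group consecutive layers into blocks(periods)."""
--     if period_layers <= 0:
--         raise ValueError("period_layers must be > 0")
--
--     periods = []
--     rest = layers
--     while len(rest) >= period_layers:
--         block, rest = rest[:period_layers], rest[period_layers:]
--         periods.append(sorted(int(a) for layer in block for a in layer))
--     return periods
-- ===== Notes on version B (the rewrite author's own statement) =====
-- stated objective: simpler
-- what changed: B consumes the list front-to-back with a take/drop loop (block, rest = rest[:k], rest[k:]) instead of computing npd = nl // period_layers and slicing by index arithmetic p*k..p*k+k over range(npd); trailing remainder layers are dropped because the loop stops when fewer than period_layers remain.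
import Mathlib
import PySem

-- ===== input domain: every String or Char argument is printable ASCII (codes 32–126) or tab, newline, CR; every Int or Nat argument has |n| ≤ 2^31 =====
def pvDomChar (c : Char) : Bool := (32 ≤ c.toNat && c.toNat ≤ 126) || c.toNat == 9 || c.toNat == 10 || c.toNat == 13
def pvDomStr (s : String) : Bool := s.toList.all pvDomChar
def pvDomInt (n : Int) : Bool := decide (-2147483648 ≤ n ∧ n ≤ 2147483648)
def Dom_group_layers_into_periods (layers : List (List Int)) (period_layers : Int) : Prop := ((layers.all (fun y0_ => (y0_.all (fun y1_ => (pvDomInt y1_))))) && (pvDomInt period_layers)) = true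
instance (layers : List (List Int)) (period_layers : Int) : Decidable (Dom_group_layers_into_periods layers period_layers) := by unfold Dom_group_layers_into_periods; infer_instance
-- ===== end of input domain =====

-- B groups layers by repeatedly taking/dropping the first period_layers layers instead of
-- slicing by index arithmetic over range(nl // period_layers); same cost, plainer loop.


-- ===== PORT A =====
def group_layers_into_periods (layers : List (List Int)) (period_layers : Int) : List (List Int) :=
  if period_layers ≤ 0 then []  -- raise ValueError (outside Pre_)
  else
    let nl : Int := layers.length
    let npd : Int := PySem.Int.floordiv nl period_layers
    (PySem.List.pyRange 0 npd 1).foldl (fun periods p =>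
      let s := p * period_layers
      let e := s + period_layers
      let block_layers := PySem.List.slice layers (some s) (some e)
      let atom_idx := PySem.List.sorted (block_layers.flatMap (fun layer => layer.map (fun a => a))) (fun x => x) false
      periods ++ [atom_idx]) []

-- ===== PORT B =====
-- the while loop: while len(rest) >= period_layers: block, rest = rest[:k], rest[k:]; periods.append(sorted(...))
def pvAltGo (k : Nat) (rest : List (List Int)) (periods : List (List Int)) : List (List Int) :=
  if h : k ≤ rest.length ∧ 0 < k then
    pvAltGo k (rest.drop k)
      (periods ++ [PySem.List.sorted ((rest.take k).flatMap (fun layer => layer.map (fun a => a))) (fun x => x) false])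
  else periods
termination_by rest.length
decreasing_by simp only [List.length_drop]; omega

def group_layers_into_periods_alt (layers : List (List Int)) (period_layers : Int) : List (List Int) :=
  if period_layers ≤ 0 then []  -- raise ValueError (outside Pre_)
  else pvAltGo period_layers.toNat layers []

-- ===== PRECONDITION & SPEC =====
-- A raises ValueError when period_layers <= 0; those inputs are excluded.
def Pre_group_layers_into_periods (layers : List (List Int)) (period_layers : Int) : Prop := 0 < period_layers
instance (layers : List (List Int)) (period_layers : Int) : Decidable (Pre_group_layers_into_periods layers period_layers) := by unfold Pre_group_layers_into_periods; infer_instance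
def pvWitness_group_layers_into_periods : List (List Int) × Int := ([[3, 1], [2], [5]], 2)

def Spec_group_layers_into_periods (layers : List (List Int)) (period_layers : Int) (out : List (List Int)) : Prop := out = group_layers_into_periods_alt layers period_layers
instance (layers : List (List Int)) (period_layers : Int) (out : List (List Int)) : Decidable (Spec_group_layers_into_periods layers period_layers out) := by unfold Spec_group_layers_into_periods; infer_instance

-- ===== CLAIM (what is proved, stated in full; the proofs are below) =====
def Claim_equal_group_layers_into_periods : Prop := ∀ (layers : List (List Int)) (period_layers : Int), Dom_group_layers_into_periods layers period_layers → Pre_group_layers_into_periods layers period_layers → Spec_group_layers_into_periods layers period_layers (group_layers_into_periods layers period_layers)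

-- ===== LEMMAS AND PROOFS =====

-- the common block computation
def pvBlock (bl : List (List Int)) : List Int :=
  PySem.List.sorted (bl.flatMap (fun layer => layer.map (fun a => a))) (fun x => x) false

-- B's loop produces exactly the indexed blocks
theorem pvAltGo_eq (K : Nat) (hK : 0 < K) (xs acc : List (List Int)) :
    pvAltGo K xs acc =
      acc ++ (List.range (xs.length / K)).map (fun p => pvBlock ((xs.drop (p * K)).take K)) := by
  by_cases h : K ≤ xs.length
  · rw [pvAltGo]
    simp only [h, hK, and_true, dite_true]
    rw [pvAltGo_eq K hK (xs.drop K)]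
    have hdiv : xs.length / K = (xs.length - K) / K + 1 := Nat.div_eq_sub_div hK h
    rw [List.length_drop, hdiv, List.range_succ_eq_map]
    simp only [List.map_cons, List.map_map]
    have : ∀ p : Nat, ((xs.drop K).drop (p * K)).take K = (xs.drop ((p + 1) * K)).take K := by
      intro p
      rw [List.drop_drop]
      congr 1
      ring_nf
    simp only [this]
    simp [pvBlock]
  · rw [pvAltGo]
    have hlt : xs.length < K := by omega
    simp [h, Nat.div_eq_of_lt hlt]
termination_by xs.length
decreasing_by simp only [List.length_drop]; omega

-- ===== VERDICT (by name: the statement is the Claim_ definition above) =====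
theorem group_layers_into_periods_spec : Claim_equal_group_layers_into_periods := by
  intro layers k _ hk
  have hk0 : 0 < k := hk
  unfold Spec_group_layers_into_periods group_layers_into_periods group_layers_into_periods_alt
  have hk' : ¬ k ≤ 0 := by omega
  simp only [hk', if_false]
  obtain ⟨K, rfl⟩ : ∃ K : Nat, k = (K : Int) := ⟨k.toNat, by omega⟩
  have hK : 0 < K := by omega
  rw [Int.toNat_natCast]
  rw [pvAltGo_eq K hK layers []]
  -- A's side
  have hnpd : PySem.Int.floordiv (layers.length : Int) (K : Int) = ((layers.length / K : Nat) : Int) :=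
    PySem.Int.floordiv_natCast layers.length K
  rw [PySem.List.foldl_append_singleton_eq_map, hnpd, PySem.List.pyRange_zero_natCast,
    List.map_map, List.nil_append]
  refine List.map_congr_left ?_
  intro p _
  simp only [Function.comp]
  have hcast : ((p : Int) * (K : Int)) = (((p * K : Nat)) : Int) := by push_cast; ring
  rw [hcast, PySem.List.slice_natCast_add]
  rfl
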